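-- pv_equiv track=rewrite | github.com/DairaDoo/Ejemplo_tutorias | projects/python/EstructuraDeDatos/exampl2.py | example_algo
-- ===== SOURCE A (Python) =====
-- def example_algo(n):
--     total = 0
--     for i in range(n):
--         for j in range(n):
--             total += i * j
--     for k in range(n):
--         if k % 2 == 0:total += k
--     return total
-- ===== SOURCE B (Python) =====
-- def example_algo(n):
--     # closed form instead of the quadratic double loop
--     m = max(n, 0)
--     s = m * (m - 1) // 2       # sum of 0..m-1
--     e = (m - 1) // 2           # largest t with 2t < m (e*(e+1) = sum of evens below m)
--     return s * s + e * (e + 1)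
-- ===== Notes on version B (the rewrite author's own statement) =====
-- stated objective: faster
-- what changed: Replaced the O(n^2) double loop and the even-sum loop by closed-form formulas: (sum 0..n-1)^2 plus m(m+1) for the evens.
import Mathlib
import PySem

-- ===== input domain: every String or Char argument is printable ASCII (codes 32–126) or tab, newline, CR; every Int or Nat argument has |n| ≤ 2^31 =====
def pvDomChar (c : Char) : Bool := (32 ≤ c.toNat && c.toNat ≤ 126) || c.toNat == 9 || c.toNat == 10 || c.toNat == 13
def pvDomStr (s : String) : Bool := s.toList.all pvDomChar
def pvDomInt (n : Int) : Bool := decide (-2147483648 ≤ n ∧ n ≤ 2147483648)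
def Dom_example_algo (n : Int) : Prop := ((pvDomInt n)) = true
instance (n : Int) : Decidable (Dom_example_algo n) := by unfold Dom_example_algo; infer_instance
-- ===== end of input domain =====

-- B replaces A's O(n^2) double loop and even-sum loop by closed-form formulas (asymptotically faster).

-- ===== PORT A =====
def example_algo (n : Int) : Int :=
  let total :=
    (PySem.List.pyRange 0 n 1).foldl
      (fun total i =>
        (PySem.List.pyRange 0 n 1).foldl (fun t j => t + i * j) total) 0
  (PySem.List.pyRange 0 n 1).foldl
    (fun t k => if PySem.Int.mod k 2 = 0 then t + k else t) total

-- ===== PORT B =====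
def example_algo_alt (n : Int) : Int :=
  let m := max n 0
  let s := PySem.Int.floordiv (m * (m - 1)) 2
  let e := PySem.Int.floordiv (m - 1) 2
  s * s + e * (e + 1)

-- ===== PRECONDITION & SPEC =====
def Spec_example_algo (n : Int) (out : Int) : Prop := out = example_algo_alt n
instance (n : Int) (out : Int) : Decidable (Spec_example_algo n out) := by unfold Spec_example_algo; infer_instance

-- ===== CLAIM (what is proved, stated in full; the proofs are below) =====
def Claim_equal_example_algo : Prop := ∀ (n : Int), Dom_example_algo n → Spec_example_algo n (example_algo n)

-- ===== LEMMAS AND PROOFS =====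

-- for p in range: fold of conditional accumulation is the sum of a 0/1-masked map
theorem foldl_if_add (p : Int → Prop) [DecidablePred p] (l : List Int) (a : Int) :
    l.foldl (fun t k => if p k then t + k else t) a
      = a + (l.map (fun k => if p k then k else 0)).sum := by
  induction l generalizing a with
  | nil => simp
  | cons x t ih =>
      by_cases h : p x
      · simp [h, ih]; ring
      · simp [h, ih]

theorem two_mul_sum_range (N : Nat) :
    2 * ((List.range N).map (fun (k : Nat) => (k : Int))).sum = (N : Int) * ((N : Int) - 1) := by
  induction N with
  | zero => simp
  | succ N ih =>
      rw [List.range_succ]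
      simp only [List.map_append, List.sum_append, List.map_cons, List.map_nil,
        List.sum_cons, List.sum_nil]
      push_cast
      linear_combination ih

theorem even_sum_range (N : Nat) :
    ((List.range N).map (fun (k : Nat) => if PySem.Int.mod (k : Int) 2 = 0 then (k : Int) else 0)).sum
      = (((N : Int) - 1) / 2) * ((((N : Int) - 1) / 2) + 1) := by
  induction N with
  | zero => decide
  | succ N ih =>
      rw [List.range_succ]
      simp only [List.map_append, List.sum_append, List.map_cons, List.map_nil,
        List.sum_cons, List.sum_nil, ih]
      rw [PySem.Int.mod_eq_emod_of_pos (by norm_num)]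
      rcases Int.even_or_odd (N : Int) with ⟨t, ht⟩ | ⟨t, ht⟩
      · have h0 : ((N : Int)) % 2 = 0 := by omega
        have he : ((N : Int) - 1) / 2 = t - 1 := by omega
        have he' : ((N : Int) + 1 - 1) / 2 = t := by omega
        push_cast
        rw [h0, he, he', if_pos rfl]
        linear_combination ht
      · have h1 : ¬ ((N : Int)) % 2 = 0 := by omega
        have he : ((N : Int) - 1) / 2 = t := by omega
        have he' : ((N : Int) + 1 - 1) / 2 = t := by omega
        push_cast
        rw [if_neg h1, he, he']
        ring

-- ===== VERDICT (by name: the statement is the Claim_ definition above) =====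
theorem example_algo_spec : Claim_equal_example_algo := by
  intro n _
  show example_algo n = example_algo_alt n
  unfold example_algo example_algo_alt
  obtain ⟨N, hmN⟩ : ∃ N : Nat, (N : Int) = max n 0 := ⟨(max n 0).toNat, by omega⟩
  have hnm : PySem.List.pyRange 0 n 1 = (List.range N).map (fun (k : Nat) => (k : Int)) := by
    rw [PySem.List.pyRange_one]
    have h1 : (n - 0).toNat = N := by omega
    rw [h1]
    simp only [zero_add]
  rw [hnm, foldl_if_add, List.map_map]
  simp only [Function.comp_def]
  rw [show (fun (total i : Int) =>
        List.foldl (fun t j => t + i * j) total ((List.range N).map (fun (k : Nat) => (k : Int))))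
      = (fun total i => total + i * ((List.range N).map (fun (k : Nat) => (k : Int))).sum) from by
    funext total i
    rw [PySem.List.foldl_add (g := fun j => i * j)]
    rw [← List.sum_map_mul_left]
    simp [List.map_map, Function.comp_def]]
  rw [PySem.List.foldl_add (g := fun i => i * ((List.range N).map (fun (k : Nat) => (k : Int))).sum)]
  rw [List.sum_map_mul_right]
  simp only [List.map_id']
  simp only [zero_add]
  have h2S : 2 * ((List.range N).map (fun (k : Nat) => (k : Int))).sum
      = (N : Int) * ((N : Int) - 1) := two_mul_sum_range N
  rw [even_sum_range N]
  have hs : PySem.Int.floordiv (max n 0 * (max n 0 - 1)) 2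
      = ((List.range N).map (fun (k : Nat) => (k : Int))).sum := by
    rw [PySem.Int.floordiv_eq_ediv_of_pos (by norm_num), ← hmN, ← h2S]
    omega
  have he : PySem.Int.floordiv (max n 0 - 1) 2 = ((N : Int) - 1) / 2 := by
    rw [PySem.Int.floordiv_eq_ediv_of_pos (by norm_num), hmN]
  rw [hs, he, hmN]
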